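-- pv_equiv track=rewrite | github.com/josiegel/AOC-2024 | Day 11/aoc 2024 day 11 part 2.py | morph_dict
-- ===== SOURCE A (Python) =====
-- from collections import Counter
--
-- def morph_dict(stones, blinks):
--     new_stones = Counter()
--     for stone in stones:
--         if stone == 0:
--             new_stones[1] += stones[stone]
--         elif len(str(stone)) % 2 == 0:
--             st = str(stone)
--             new_stones[int(st[:len(st)//2])] += stones[stone]
--             new_stones[int(st[len(st)//2:])] += stones[stone]
--         else:
--             new_stones[2024*stone] += stones[stone]
--     if blinks == 1:
--         return new_stones
--     else:
--         return morph_dict(new_stones, blinks-1)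
-- ===== SOURCE B (Python) =====
-- from collections import Counter
--
--
-- def _children(stone):
--     # the one-blink successors of a single stone
--     if stone == 0:
--         return [1]
--     s = str(stone)
--     if len(s) % 2 == 1:
--         return [2024 * stone]
--     h = len(s) // 2
--     return [int(s[:h]), int(s[h:])]
--
--
-- def morph_dict(stones, blinks):
--     while True:
--         new_stones = Counter()
--         for stone, count in stones.items():
--             for child in _children(stone):
--                 new_stones[child] += count
--         if blinks == 1:
--             return new_stones
--         stones = new_stones
--         blinks -= 1
-- ===== Notes on version B (the rewrite author's own statement) =====
-- stated objective: idiomatic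
-- what changed: The tail recursion over blinks becomes an explicit while-loop, the per-stone transition is factored into a _children helper returning a list, and the step iterates over (stone, count) items instead of iterating keys and re-looking each key up.
-- outside the precondition, e.g. on morph_dict({-12: 1}, 1): A returns {-24288: 1}, B returns {-24288: 1}; on morph_dict({-123: 2}, 2): A raises ValueError, B raises ValueError
import Mathlib
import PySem

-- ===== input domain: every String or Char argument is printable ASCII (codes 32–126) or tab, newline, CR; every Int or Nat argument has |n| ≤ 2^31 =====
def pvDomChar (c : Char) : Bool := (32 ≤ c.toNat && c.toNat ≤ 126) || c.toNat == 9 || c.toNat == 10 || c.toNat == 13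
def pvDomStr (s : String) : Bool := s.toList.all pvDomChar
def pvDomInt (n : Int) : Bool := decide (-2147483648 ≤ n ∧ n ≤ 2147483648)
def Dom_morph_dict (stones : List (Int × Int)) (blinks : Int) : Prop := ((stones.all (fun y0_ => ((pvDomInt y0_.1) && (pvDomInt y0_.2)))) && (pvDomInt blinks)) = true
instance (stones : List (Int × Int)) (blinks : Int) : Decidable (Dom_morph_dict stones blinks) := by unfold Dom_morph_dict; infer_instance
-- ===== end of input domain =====

-- B replaces A's tail recursion by a while-loop and factors the per-stone step into a
-- children-list helper folded over (stone, count) items (idiomatic; same asymptotic cost).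
-- The dict arguments/results are association lists in insertion order.

-- ===== PORT A =====
-- stones[stone]: first-match lookup in the association list; the default 0 is unreachable
-- because stone is always drawn from stones' own keys (no KeyError in A).
def pyLookupA (stones : List (Int × Int)) (k : Int) : Int :=
  ((stones.find? (fun p => p.1 == k)).map Prod.snd).getD 0

-- the body of A's `for stone in stones` loop building the Counter `new_stones`;
-- Counter's `new_stones[k] += v` is Dict.modify k 0 (· + v);
-- st[:h] / st[h:] with h = len(st)//2 ≥ 0 are exactly take/drop (PySem.List.slice_to_natCast);
-- int(...) is ofChars?; its none case (Python ValueError, e.g. int('-')) is outside Pre_.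
def stepA (stones : List (Int × Int)) : PySem.Dict Int Int :=
  stones.foldl
    (fun d p =>
      let stone := p.1
      if stone == 0 then
        d.modify 1 0 (· + pyLookupA stones stone)
      else if (PySem.Int.toChars stone).length % 2 == 0 then
        let st := PySem.Int.toChars stone
        let d1 := d.modify ((PySem.Int.ofChars? (st.take (st.length / 2))).getD 0) 0
                    (· + pyLookupA stones stone)
        d1.modify ((PySem.Int.ofChars? (st.drop (st.length / 2))).getD 0) 0
                    (· + pyLookupA stones stone)
      else
        d.modify (2024 * stone) 0 (· + pyLookupA stones stone))
    PySem.Dict.empty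

-- A's recursion: `if blinks == 1: return new_stones else: return morph_dict(new_stones, blinks-1)`.
-- The `≤` (instead of `==`) is only a totality guard: for blinks < 1 Python A never returns
-- (RecursionError), which Pre_ excludes.
def morph_dict (stones : List (Int × Int)) (blinks : Int) : List (Int × Int) :=
  let new_stones := (stepA stones).items
  if blinks ≤ 1 then new_stones
  else morph_dict new_stones (blinks - 1)
termination_by blinks.toNat
decreasing_by omega

-- ===== PORT B =====
-- Source B's _children helper (same string split; int(...) none case is outside Pre_)
def childrenB (stone : Int) : List Int :=
  if stone == 0 then [1]
  else
    let s := PySem.Int.toChars stone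
    if s.length % 2 == 1 then [2024 * stone]
    else
      let h := s.length / 2
      [(PySem.Int.ofChars? (s.take h)).getD 0, (PySem.Int.ofChars? (s.drop h)).getD 0]

-- one iteration of Source B's while-loop body: Counter's `new_stones[child] += count` is Dict.modify
def stepB (stones : List (Int × Int)) : PySem.Dict Int Int :=
  stones.foldl
    (fun d p => (childrenB p.1).foldl (fun d c => d.modify c 0 (· + p.2)) d)
    PySem.Dict.empty

-- Source B's `while True` loop with the decrementing blinks counter; `≤` is the same totality
-- guard as in the A port (for blinks < 1 the Python loop never returns, outside Pre_).
def morph_dict_alt (stones : List (Int × Int)) (blinks : Int) : List (Int × Int) :=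
  let new_stones := (stepB stones).items
  if blinks ≤ 1 then new_stones
  else morph_dict_alt new_stones (blinks - 1)
termination_by blinks.toNat
decreasing_by omega

-- ===== PRECONDITION & SPEC =====
-- Pre_ excludes: (a) blinks < 1, where A recurses forever (RecursionError); (b) duplicate keys,
-- impossible for a Python dict argument (the association list with duplicates has no faithful
-- dict counterpart); (c) negative stone keys, because a single-digit negative stone — present
-- initially or produced by splitting another negative stone after some blinks — makes A raise
-- ValueError on int('-'); reachability is not closed-form, so all negative keys are excluded,
-- which also drops some inputs where A returns normally (see the cites).
def Pre_morph_dict (stones : List (Int × Int)) (blinks : Int) : Prop :=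
  (stones.map Prod.fst).Nodup ∧ (∀ p ∈ stones, 0 ≤ p.1) ∧ 1 ≤ blinks
instance (stones : List (Int × Int)) (blinks : Int) : Decidable (Pre_morph_dict stones blinks) := by
  unfold Pre_morph_dict; infer_instance

def pvWitness_morph_dict : (List (Int × Int)) × Int := ([(0, 1), (12, 3)], 2)

def Spec_morph_dict (stones : List (Int × Int)) (blinks : Int) (out : List (Int × Int)) : Prop :=
  out = morph_dict_alt stones blinks
instance (stones : List (Int × Int)) (blinks : Int) (out : List (Int × Int)) : Decidable (Spec_morph_dict stones blinks out) := by
  unfold Spec_morph_dict; infer_instance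

-- ===== CLAIM (what is proved, stated in full; the proofs are below) =====
def Claim_equal_morph_dict : Prop := ∀ (stones : List (Int × Int)) (blinks : Int), Dom_morph_dict stones blinks → Pre_morph_dict stones blinks → Spec_morph_dict stones blinks (morph_dict stones blinks)

-- ===== LEMMAS AND PROOFS =====

-- on a duplicate-free association list, A's key lookup returns the pair's own value
theorem pyLookupA_eq_snd (s : List (Int × Int)) (hnd : (s.map Prod.fst).Nodup)
    (p : Int × Int) (hp : p ∈ s) : pyLookupA s p.1 = p.2 := by
  induction s with
  | nil => cases hp
  | cons q t ih =>
    simp only [List.map_cons, List.nodup_cons] at hnd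
    rcases List.mem_cons.1 hp with rfl | hpt
    · simp [pyLookupA]
    · have hne : ¬ (q.1 == p.1) = true := by
        intro h
        exact hnd.1 (by
          have : q.1 = p.1 := by simpa using h
          rw [this]
          exact List.mem_map.2 ⟨p, hpt, rfl⟩)
      have := ih hnd.2 hpt
      simpa [pyLookupA, List.find?, hne] using this

-- the two loop bodies agree on every pair of a duplicate-free list
theorem step_body_eq (s : List (Int × Int)) (hnd : (s.map Prod.fst).Nodup)
    (d : PySem.Dict Int Int) (p : Int × Int) (hp : p ∈ s) :
    (fun d (p : Int × Int) =>
      let stone := p.1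
      if stone == 0 then
        d.modify 1 0 (· + pyLookupA s stone)
      else if (PySem.Int.toChars stone).length % 2 == 0 then
        let st := PySem.Int.toChars stone
        let d1 := d.modify ((PySem.Int.ofChars? (st.take (st.length / 2))).getD 0) 0
                    (· + pyLookupA s stone)
        d1.modify ((PySem.Int.ofChars? (st.drop (st.length / 2))).getD 0) 0
                    (· + pyLookupA s stone)
      else
        d.modify (2024 * stone) 0 (· + pyLookupA s stone)) d p
    = (childrenB p.1).foldl (fun d c => d.modify c 0 (· + p.2)) d := by
  have hl : pyLookupA s p.1 = p.2 := pyLookupA_eq_snd s hnd p hp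
  by_cases h0 : p.1 = 0
  · rw [h0] at hl
    simp [h0, childrenB, PySem.Dict.modify, hl]
  · by_cases he : (PySem.Int.toChars p.1).length % 2 == 0
    · have ho : ¬ ((PySem.Int.toChars p.1).length % 2 == 1) = true := by
        simp only [beq_iff_eq] at he ⊢; omega
      simp [h0, he, childrenB, ho, PySem.Dict.modify, hl]
    · have ho : ((PySem.Int.toChars p.1).length % 2 == 1) = true := by
        simp only [beq_iff_eq] at he ⊢; omega
      simp [h0, he, childrenB, ho, PySem.Dict.modify, hl]

theorem stepA_eq_stepB (s : List (Int × Int)) (hnd : (s.map Prod.fst).Nodup) :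
    stepA s = stepB s := by
  unfold stepA stepB
  exact PySem.List.foldl_congr_mem s _ _ _ (fun d p hp => step_body_eq s hnd d p hp)

-- every dict built by Source B's insert loop from empty has duplicate-free keys
theorem nodup_keys_inner (l : List Int) (v : Int) :
    ∀ d : PySem.Dict Int Int, d.keys.Nodup →
      (l.foldl (fun d c => d.modify c 0 (· + v)) d).keys.Nodup := by
  induction l with
  | nil => intro d h; exact h
  | cons c t ih =>
    intro d h
    exact ih _ (PySem.Dict.nodup_keys_insert d c _ h)

theorem nodup_keys_stepB (s : List (Int × Int)) : ((stepB s).items.map Prod.fst).Nodup := by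
  have : ∀ d : PySem.Dict Int Int, d.keys.Nodup →
      (s.foldl (fun d p => (childrenB p.1).foldl (fun d c => d.modify c 0 (· + p.2)) d) d).keys.Nodup := by
    induction s with
    | nil => intro d h; exact h
    | cons p t ih =>
      intro d h
      exact ih _ (nodup_keys_inner (childrenB p.1) p.2 d h)
  have h0 : (PySem.Dict.empty : PySem.Dict Int Int).keys.Nodup := by
    simp [PySem.Dict.empty, PySem.Dict.keys]
  exact this PySem.Dict.empty h0

theorem morph_eq_aux : ∀ (n : Nat) (blinks : Int), blinks.toNat ≤ n →
    ∀ (stones : List (Int × Int)), (stones.map Prod.fst).Nodup →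
      morph_dict stones blinks = morph_dict_alt stones blinks := by
  intro n
  induction n with
  | zero =>
    intro b hb s hnd
    have hle : b ≤ 1 := by omega
    rw [morph_dict, morph_dict_alt]
    simp [hle, stepA_eq_stepB s hnd]
  | succ n ih =>
    intro b hb s hnd
    rw [morph_dict, morph_dict_alt]
    by_cases hle : b ≤ 1
    · simp [hle, stepA_eq_stepB s hnd]
    · have hrec := ih (b - 1) (by omega) (stepB s).items (nodup_keys_stepB s)
      simp [hle, stepA_eq_stepB s hnd, hrec]

-- ===== VERDICT (by name: the statement is the Claim_ definition above) =====
theorem morph_dict_spec : Claim_equal_morph_dict := by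
  intro stones blinks _ hpre
  unfold Spec_morph_dict
  exact morph_eq_aux blinks.toNat blinks le_rfl stones hpre.1
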